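/- GENERATED by c/gen_decode.py: decode facts of the image, one per distinct instruction byte string. -/
import UserX.DecodeImage

#decode_all Vorbis.Dec
  "0f28c4"  -- movaps xmm0,xmm4
  "0f8448ffffff"  -- je 107767
  "0f84ee000000"  -- je 113e2d
  "0f8825010000"  -- js 10f4d3
  "0f8f11feffff"  -- jg 111058
  "0fb685d3060000"  -- movzx eax,BYTE PTR [rbp+0x6d3]
  "396c240c"  -- cmp DWORD PTR [rsp+0xc],ebp
  "410fb606"  -- movzx eax,BYTE PTR [r14]
  "4139ed"  -- cmp r13d,ebp
  "41885701"  -- mov BYTE PTR [r15+0x1],dl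
  "418b4608"  -- mov eax,DWORD PTR [r14+0x8]
  "41c7042403000000"  -- mov DWORD PTR [r12],0x3
  "438d0436"  -- lea eax,[r14+r14*1]
  "4439b340010000"  -- cmp DWORD PTR [rbx+0x140],r14d
  "44896d00"  -- mov DWORD PTR [rbp+0x0],r13d
  "4489ef"  -- mov edi,r13d
  "448ba3e4060000"  -- mov r12d,DWORD PTR [rbx+0x6e4]
  "45396604"  -- cmp DWORD PTR [r14+0x4],r12d
  "458b26"  -- mov r12d,DWORD PTR [r14]
  "4801e8"  -- add rax,rbp
  "48635c2448"  -- movsxd rbx,DWORD PTR [rsp+0x48]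
  "4881ffefffff00"  -- cmp rdi,0xffffef
  "4889142560f01f00"  -- mov QWORD PTR ds:0x1ff060,rdx
  "4889d9"  -- mov rcx,rbx
  "488b7330"  -- mov rsi,QWORD PTR [rbx+0x30]
  "488d1c83"  -- lea rbx,[rbx+rax*4]
  "488d7b1b"  -- lea rdi,[rbx+0x1b]
  "488d842440010000"  -- lea rax,[rsp+0x140]
  "488dbbf0060000"  -- lea rdi,[rbx+0x6f0]
  "48b8ffffffffffff0f00"  -- movabs rax,0xfffffffffffff
  "48c78570ffffffb38ab541"  -- mov QWORD PTR [rbp-0x90],0x41b58ab3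
  "4963de"  -- movsxd rbx,r14d
  "4989fc"  -- mov r12,rdi
  "498d7d08"  -- lea rdi,[r13+0x8]
  "498dbfd8010000"  -- lea rdi,[r15+0x1d8]
  "4a8dbcb422010000"  -- lea rdi,[rsp+r14*4+0x122]
  "4c636c241c"  -- movsxd r13,DWORD PTR [rsp+0x1c]
  "4c89e5"  -- mov rbp,r12
  "4c8bb548ffffff"  -- mov r14,QWORD PTR [rbp-0xb8]
  "4d0326"  -- add r12,QWORD PTR [r14]
  "4d8d64246c"  -- lea r12,[r12+0x6c]
  "660f2ee4"  -- ucomisd xmm4,xmm4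
  "66410f6efe"  -- movd xmm7,r14d
  "6689542410"  -- mov WORD PTR [rsp+0x10],dx
  "7429"  -- je 114780
  "7518"  -- jne 102abb
  "7821"  -- js 114d41
  "7e27"  -- jle 115443
  "807b1b00"  -- cmp BYTE PTR [rbx+0x1b],0x0
  "83bd6cffffff01"  -- cmp DWORD PTR [rbp-0x94],0x1
  "8913"  -- mov DWORD PTR [rbx],edx
  "8982e4060000"  -- mov DWORD PTR [rdx+0x6e4],eax
  "89fb"  -- mov ebx,edi
  "8b6b78"  -- mov ebp,DWORD PTR [rbx+0x78]
  "8bab88000000"  -- mov ebp,DWORD PTR [rbx+0x88]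
  "ba04000000"  -- mov edx,0x4
  "c1fe03"  -- sar esi,0x3
  "c7830400c000f1f10000"  -- mov DWORD PTR [rbx+0xc00004],0xf1f1
  "e80112ffff"  -- call 100640
  "e80ad4feff"  -- call 100640
  "e815cdffff"  -- call 108f20
  "e81e70ffff"  -- call 10d1c0
  "e828c1ffff"  -- call 100300
  "e830f0feff"  -- call 100720
  "e83baafeff"  -- call 100800
  "e8472affff"  -- call 100640
  "e851a7feff"  -- call 100800
  "e85cd3ffff"  -- call 100720
  "e86a45ffff"  -- call 100800
  "e875c9feff"  -- call 1008e0
  "e87ff2feff"  -- call 100640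
  "e88bb7feff"  -- call 100800
  "e89553ffff"  -- call 100720
  "e89f7fffff"  -- call 100300
  "e8aa0effff"  -- call 100800
  "e8b33affff"  -- call 1081a0
  "e8bdcafeff"  -- call 100720
  "e8c87bffff"  -- call 10d1c0
  "e8d1a1feff"  -- call 100560
  "e8dbc7ffff"  -- call 10d440
  "e8e576ffff"  -- call 10d1c0
  "e8edecffff"  -- call 100300
  "e8f878ffff"  -- call 109220
  "e913f8ffff"  -- jmp 115f97
  "e960deffff"  -- jmp 113b22
  "e9ac020000"  -- jmp 1062bc
  "e9fdf2ffff"  -- jmp 113b22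
  "eb95"  -- jmp 104372
  "ebee"  -- jmp 102752
  "f20f58d8"  -- addsd xmm3,xmm0
  "f20f5e1da0e10100"  -- divsd xmm3,QWORD PTR [rip+0x1e1a0]
  "f30f1055b0"  -- movss xmm2,DWORD PTR [rbp-0x50]
  "f30f107c2410"  -- movss xmm7,DWORD PTR [rsp+0x10]
  "f30f1155a0"  -- movss DWORD PTR [rbp-0x60],xmm2
  "f30f117c2420"  -- movss DWORD PTR [rsp+0x20],xmm7
  "f30f5903"  -- mulss xmm0,DWORD PTR [rbx]
  "f30f5c43fc"  -- subss xmm0,DWORD PTR [rbx-0x4]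
  "f3410f1054240c"  -- movss xmm2,DWORD PTR [r12+0xc]
  "f4"  -- hlt
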